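-- pv_equiv track=rewrite | github.com/lig96/Baekjoon | 백준/Gold/17140. 이차원 배열과 연산/이차원 배열과 연산.py | do_oper
-- ===== SOURCE A (Python) =====
-- from collections import Counter
--
-- def do_oper(A, oper):
--     if oper == "C":
--         temp = [x for x in zip(*A)]
--     else:
--         temp = A
--
--     ret = []
--     for arr in temp:
--         items = list(Counter(arr).items())
--         # dict_items([(v, cnt), (v, cnt), (v, cnt)])
--         items.sort(key=lambda x: (x[1], x[0]))
--         # 그 다음, 수의 등장 횟수가 커지는 순으로,
--         # 그러한 것이 여러가지면 수가 커지는 순으로 정렬한다.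
--         after_sort = []
--         # 그 다음에는 배열 A에 정렬된 결과를 다시 넣어야 한다.
--         # 정렬된 결과를 배열에 넣을 때는, 수와 등장 횟수를
--         # 모두 넣으며, 순서는 수가 먼저이다.
--         for v in items:
--             if v[0] == 0:
--                 # 수를 정렬할 때 0은 무시해야 한다.
--                 continue
--             after_sort.append(v[0])
--             after_sort.append(v[1])
--         ret.append(after_sort)
--     max_leng = max(map(len, ret))
--     ret = [x+[0 for _ in range(max_leng-len(x))] for x in ret]
--     # R 연산이 적용된 경우에는 가장 큰 행을 기준으로
--     # 모든 행의 크기가 변하고, C 연산이 적용된 경우에는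
--     # 가장 큰 열을 기준으로 모든 열의 크기가 변한다.
--     # 행 또는 열의 크기가 커진 곳에는 0이 채워진다.
--     ret = ret[:100]
--     # 행 또는 열의 크기가 100을 넘어가는 경우에는
--     # 처음 100개를 제외한 나머지는 버린다.
--
--     if oper == "C":
--         ret = [x for x in zip(*ret)]
--     else:
--         ret = ret
--     return ret
-- ===== SOURCE B (Python) =====
-- def do_oper(A, oper):
--     # Bucket (counting) sort by multiplicity instead of a comparison sort of
--     # (value, count) pairs: values are bucketed by their count (1..len(row)),
--     # buckets are emitted in increasing count order, values ascending inside.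
--     rows = list(zip(*A)) if oper == "C" else A
--     ret = []
--     for arr in rows:
--         counts = {}
--         for v in arr:
--             counts[v] = counts.get(v, 0) + 1
--         buckets = [[] for _ in range(len(arr) + 1)]
--         for v in sorted(counts):
--             if v != 0:
--                 buckets[counts[v]].append(v)
--         row = []
--         for c in range(1, len(arr) + 1):
--             for v in buckets[c]:
--                 row.append(v)
--                 row.append(c)
--         ret.append(row)
--     width = max(map(len, ret))
--     out = [r + [0] * (width - len(r)) for r in ret[:100]]
--     return list(zip(*out)) if oper == "C" else out
-- ===== Notes on version B (the rewrite author's own statement) =====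
-- stated objective: alternative
-- what changed: The per-row ordering is done by a bucket (counting) sort instead of a comparison sort of (value,count) pairs: counts are built with a plain dict loop, values are placed into buckets indexed by their multiplicity (bounded by the row length), and the row is emitted by walking counts 1..len(row) with values ascending inside each bucket; padding happens after the 100-row truncation instead of before.
import Mathlib
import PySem

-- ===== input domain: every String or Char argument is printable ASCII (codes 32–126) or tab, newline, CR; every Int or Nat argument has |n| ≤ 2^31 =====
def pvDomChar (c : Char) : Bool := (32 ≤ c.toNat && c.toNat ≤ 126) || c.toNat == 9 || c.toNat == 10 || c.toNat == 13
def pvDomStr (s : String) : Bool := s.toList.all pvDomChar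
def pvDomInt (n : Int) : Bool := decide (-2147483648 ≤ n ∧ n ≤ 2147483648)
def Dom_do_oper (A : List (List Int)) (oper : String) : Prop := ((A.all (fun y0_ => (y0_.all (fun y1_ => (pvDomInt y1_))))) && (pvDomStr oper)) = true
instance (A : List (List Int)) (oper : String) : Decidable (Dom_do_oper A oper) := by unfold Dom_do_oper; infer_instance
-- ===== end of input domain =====

-- B orders each row with a bucket (counting) sort keyed by multiplicity instead of A's comparison sort of Counter items (alternative algorithm, same cost class).

-- ===== PORT A =====

-- zip(*A): columns 0..min(row lengths)-1; exact because each index j is < every row's length, so the getD default is never used.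
def pvZipStarLen : List (List Int) → Nat
  | [] => 0
  | r :: rs => rs.foldl (fun m s => min m s.length) r.length

def pvZipStar (A : List (List Int)) : List (List Int) :=
  (List.range (pvZipStarLen A)).map (fun j => A.map (fun r => r.getD j 0))

-- one row of A's loop body: Counter → items → sort by (count, value) → append value, count, skipping value 0
def pvRowA (arr : List Int) : List Int :=
  let items := PySem.List.sorted2 ((PySem.Dict.counter arr).items) (fun x => x.2) (fun x => x.1)
  items.foldl (fun acc v => if v.1 = 0 then acc else (acc ++ [v.1]) ++ [v.2]) []

def do_oper (A : List (List Int)) (oper : String) : List (List Int) :=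
  let temp := if oper = "C" then pvZipStar A else A
  let ret := temp.foldl (fun acc arr => acc ++ [pvRowA arr]) []
  match PySem.List.max? (ret.map (fun x => x.length)) (fun y => y) with
  | none => []   -- max() on an empty sequence raises ValueError: excluded by Pre_do_oper
  | some m =>
    let ret2 := ret.map (fun x => x ++ (List.range (m - x.length)).map (fun _ => (0 : Int)))
    let ret3 := ret2.take 100     -- ret[:100], nonnegative bound
    if oper = "C" then pvZipStar ret3 else ret3

-- ===== PORT B =====

-- counts = {}; for v in arr: counts[v] = counts.get(v, 0) + 1
def pvCountsB (arr : List Int) : PySem.Dict Int Int :=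
  arr.foldl (fun d v => d.insert v (d.getD v 0 + 1)) PySem.Dict.empty

-- one row of B: bucket the nonzero distinct values (ascending) by their count, then emit
-- buckets 1..len(arr) in order, appending value then count
def pvRowB (arr : List Int) : List Int :=
  let counts := pvCountsB arr
  let buckets := (PySem.List.sorted counts.keys (fun x => x)).foldl
    (fun bs v => if v ≠ 0 then
        PySem.List.pySetD bs (counts.getD v 0) (PySem.List.pyGetD bs (counts.getD v 0) [] ++ [v])
      else bs)
    ((List.range (arr.length + 1)).map (fun _ => ([] : List Int)))
  (PySem.List.pyRange 1 (PySem.List.len arr + 1) 1).foldl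
    (fun row c => (PySem.List.pyGetD buckets c []).foldl
        (fun row v => (row ++ [v]) ++ [c]) row) []

def do_oper_alt (A : List (List Int)) (oper : String) : List (List Int) :=
  let rows := if oper = "C" then pvZipStar A else A
  let ret := rows.foldl (fun acc arr => acc ++ [pvRowB arr]) []
  match PySem.List.max? (ret.map (fun r => r.length)) (fun y => y) with
  | none => []   -- max() on an empty sequence raises ValueError: excluded by Pre_do_oper
  | some w =>
    let out := (ret.take 100).map (fun r => r ++ List.replicate (w - r.length) 0)   -- [0]*(w-len r)
    if oper = "C" then pvZipStar out else out

-- ===== PRECONDITION & SPEC =====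

-- Pre_ excludes exactly the inputs where Python A raises ValueError (max() of an empty sequence):
-- an empty matrix, or, under "C", a matrix with an empty row (zip(*A) is then empty).
def Pre_do_oper (A : List (List Int)) (oper : String) : Prop :=
  if oper = "C" then A ≠ [] ∧ ∀ r ∈ A, r ≠ [] else A ≠ []
instance (A : List (List Int)) (oper : String) : Decidable (Pre_do_oper A oper) := by
  unfold Pre_do_oper; infer_instance

def pvWitness_do_oper : List (List Int) × String := ([[1, 2, 1], [0, 3, 3]], "C")

def Spec_do_oper (A : List (List Int)) (oper : String) (out : List (List Int)) : Prop := out = do_oper_alt A oper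
instance (A : List (List Int)) (oper : String) (out : List (List Int)) : Decidable (Spec_do_oper A oper out) := by unfold Spec_do_oper; infer_instance

-- ===== CLAIM (what is proved, stated in full; the proofs are below) =====
def Claim_equal_do_oper : Prop := ∀ (A : List (List Int)) (oper : String), Dom_do_oper A oper → Pre_do_oper A oper → Spec_do_oper A oper (do_oper A oper)

-- ===== LEMMAS AND PROOFS =====

-- the sorted distinct values of arr, ascending (B's 'sorted(counts)')
def pvKs (arr : List Int) : List Int := PySem.List.sorted (PySem.Set.ofList arr) (fun x => x)

-- the (value, count) pairs B emits, in B's emission order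
def pvPairsB (arr : List Int) : List (Int × Int) :=
  (List.range arr.length).flatMap (fun k =>
    ((pvKs arr).filter (fun v => decide (v ≠ 0) && decide (arr.count v = k + 1))).map
      (fun v => (v, ((k : Int) + 1))))

-- sorted2's comparator is the strict lexicographic order on the key pair
theorem pv_sorted2_eq_sorted_lex (xs : List (Int × Int)) (k1 k2 : Int × Int → Int) :
    PySem.List.sorted2 xs k1 k2 = PySem.List.sorted xs (fun x => toLex (k1 x, k2 x)) := by
  rw [PySem.List.sorted_eq_foldl_insertBy]
  unfold PySem.List.sorted2
  simp only [if_neg (by decide : ¬ (false = true))]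
  have h : (fun a b => decide (k1 a < k1 b) || (!decide (k1 b < k1 a) && decide (k2 a < k2 b)))
      = fun a b => decide ((fun x => toLex (k1 x, k2 x)) a < (fun x => toLex (k1 x, k2 x)) b) := by
    funext a b
    rcases lt_trichotomy (k1 a) (k1 b) with h | h | h
    · simp [Prod.Lex.lt_iff, h]
    · simp [Prod.Lex.lt_iff, h]
    · simp [Prod.Lex.lt_iff, h, h.not_gt, not_lt_of_gt]
  rw [h]

-- key injectivity

-- A's flattened row: the lex-sorted Counter items with the zero value removed, flattened
theorem pv_rowA_flat (arr : List Int) :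
    pvRowA arr = (((PySem.List.sorted2 ((PySem.Dict.counter arr).items) (fun x => x.2) (fun x => x.1))).filter
        (fun p => decide (p.1 ≠ 0))).flatMap (fun p => [p.1, p.2]) := by
  unfold pvRowA
  dsimp only
  rw [PySem.List.foldl_congr_mem _ _
    (fun acc (v : Int × Int) => if v.1 ≠ 0 then acc ++ [v.1, v.2] else acc) _
    (by intro acc x _; by_cases h : x.1 = 0 <;> simp [h])]
  rw [PySem.List.foldl_ite_eq_foldl_filter]
  rw [PySem.List.foldl_append_eq_flatMap (g := fun p : Int × Int => [p.1, p.2])]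
  simp

-- generic bucket-fold invariant: bucket c collects, in order, the processed nonzero values of count c
theorem pv_foldl_set_getD (arr : List Int) (ks : List Int) :
    ∀ (bs : List (List Int)), (∀ v ∈ ks, arr.count v < bs.length) →
    ∀ c : Nat,
    (ks.foldl (fun bs v => if v ≠ 0 then bs.set (arr.count v) (bs.getD (arr.count v) [] ++ [v]) else bs) bs).getD c []
      = bs.getD c [] ++ ks.filter (fun v => decide (v ≠ 0) && decide (arr.count v = c)) := by
  induction ks with
  | nil => intro bs _ c; simp
  | cons v ks ih =>
    intro bs hlen c
    simp only [List.foldl_cons, List.filter_cons]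
    by_cases hv : v ≠ 0
    · simp only [if_pos hv]
      have hcnt : arr.count v < bs.length := hlen v (List.mem_cons_self ..)
      rw [ih _ (by intro u hu; simpa using hlen u (List.mem_cons_of_mem _ hu)) c]
      by_cases hc : arr.count v = c
      · subst hc
        simp [hv, List.getD, hcnt]
      · simp [hv, hc, List.getD]
    · simp only [if_neg hv]
      simp only [ne_eq, not_not] at hv
      rw [ih _ (fun u hu => hlen u (List.mem_cons_of_mem _ hu)) c]
      simp [hv]

-- B's flattened row is the flatten of pvPairsB
theorem pv_rowB_flat (arr : List Int) :
    pvRowB arr = (pvPairsB arr).flatMap (fun p => [p.1, p.2]) := by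
  unfold pvRowB
  dsimp only
  -- counts is Counter(arr); its keys are set(arr)
  rw [show pvCountsB arr = PySem.Dict.counter arr from
    PySem.Dict.foldl_insert_getD_add_one_eq_counter arr, PySem.Dict.keys_counter]
  -- rewrite the bucket fold body into Nat-indexed set/getD
  rw [PySem.List.foldl_congr_mem _ _
    (fun (bs : List (List Int)) (v : Int) => if v ≠ 0 then bs.set (arr.count v) (bs.getD (arr.count v) [] ++ [v]) else bs) _
    (by
      intro bs v _
      rw [PySem.Dict.getD_counter, PySem.List.pySetD_natCast, PySem.List.pyGetD_natCast])]
  set B := (PySem.List.sorted (PySem.Set.ofList arr) (fun x => x)).foldl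
    (fun bs v => if v ≠ 0 then bs.set (arr.count v) (bs.getD (arr.count v) [] ++ [v]) else bs)
    ((List.range (arr.length + 1)).map (fun _ => ([] : List Int))) with hB
  have hbucket : ∀ c : Nat, B.getD c [] =
      (pvKs arr).filter (fun v => decide (v ≠ 0) && decide (arr.count v = c)) := by
    intro c
    rw [hB, pv_foldl_set_getD arr _ _ (by
      intro v hv
      have : v ∈ arr := (PySem.Set.mem_ofList arr v).mp
        ((PySem.List.sorted_perm _ _ false).mem_iff.mp hv)
      simp only [List.length_map, List.length_range]
      exact Nat.lt_succ_of_le (List.count_le_length)) c]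
    have h0 : ((List.range (arr.length + 1)).map (fun _ => ([] : List Int))).getD c [] = [] := by
      unfold List.getD
      cases h : ((List.range (arr.length + 1)).map (fun _ => ([] : List Int)))[c]? with
      | none => rfl
      | some x =>
        have := List.getElem?_map (f := fun _ => ([] : List Int)) (l := List.range (arr.length+1)) (i := c)
        rw [h] at this
        cases hr : (List.range (arr.length + 1))[c]? <;> simp_all
    rw [h0]
    rfl
  -- inner loop: append [v, c]
  rw [PySem.List.foldl_congr_mem _ _
    (fun row c => row ++ (PySem.List.pyGetD B c []).flatMap (fun v => [v, c])) _
    (by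
      intro row c _
      rw [PySem.List.foldl_congr_mem _ _ (fun row v => row ++ [v, c]) _
        (by intro r v _; simp)]
      rw [PySem.List.foldl_append_eq_flatMap])]
  rw [PySem.List.foldl_append_eq_flatMap, List.nil_append]
  -- the range list
  rw [PySem.List.len_eq, PySem.List.pyRange_one]
  have hrange : ((arr.length : Int) + 1 - 1).toNat = arr.length := by omega
  rw [hrange, List.flatMap_map]
  unfold pvPairsB
  rw [List.flatMap_assoc]
  refine List.flatMap_congr (fun k _ => ?_)
  have hc : (1 : Int) + (k : Int) = ((k+1 : Nat) : Int) := by push_cast; ring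
  rw [hc, PySem.List.pyGetD_natCast, hbucket (k+1),
    ← List.flatMap_map (f := fun v : Int => (v, ((k+1 : Nat) : Int))) (g := fun p : Int × Int => [p.1, p.2])]
  norm_num

-- key injectivity of the (count, value) lexicographic key
theorem pv_key_inj (p q : Int × Int)
    (h : (toLex (p.2, p.1) : Lex (Int × Int)) = toLex (q.2, q.1)) : p = q := by
  have := toLex.injective h
  exact Prod.ext (congrArg Prod.snd this) (congrArg Prod.fst this)

-- B's pair list is strictly increasing in the (count, value) lexicographic key

-- B's pair list is strictly increasing in the (count, value) lexicographic key
theorem pv_pairsB_pairwise (arr : List Int) :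
    (pvPairsB arr).Pairwise (fun p q => (toLex (p.2, p.1) : Lex (Int × Int)) < toLex (q.2, q.1)) := by
  unfold pvPairsB
  rw [List.pairwise_flatMap]
  constructor
  · intro k _
    rw [List.pairwise_map]
    refine ((PySem.List.sorted_ofList_pairwise_lt arr).filter _).imp ?_
    intro a b hab
    exact Prod.Lex.lt_iff.mpr (Or.inr ⟨rfl, hab⟩)
  · refine (List.pairwise_lt_range).imp ?_
    intro a b hab x hx y hy
    obtain ⟨_, _, rfl⟩ := List.mem_map.mp hx
    obtain ⟨_, _, rfl⟩ := List.mem_map.mp hy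
    exact Prod.Lex.lt_iff.mpr (Or.inl (by simp only [ofLex_toLex]; omega))

-- B's pair list has exactly the nonzero Counter items as members

-- B's pair list has exactly the nonzero Counter items as members
theorem pv_mem_pairsB (arr : List Int) (p : Int × Int) :
    p ∈ pvPairsB arr ↔ p ∈ ((PySem.Dict.counter arr).items.filter (fun q => decide (q.1 ≠ 0))) := by
  rw [List.mem_filter, PySem.Dict.items_counter]
  unfold pvPairsB
  simp only [List.mem_flatMap, List.mem_range, List.mem_map, List.mem_filter,
    Bool.and_eq_true, decide_eq_true_eq]
  constructor
  · rintro ⟨k, hk, v, ⟨hv, hv0, hcnt⟩, rfl⟩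
    have hvarr : v ∈ arr := by
      have := (PySem.List.sorted_perm (PySem.Set.ofList arr) (fun x => x) false).mem_iff.mp hv
      exact (PySem.Set.mem_ofList arr v).mp this
    refine ⟨⟨v, (PySem.Set.mem_ofList arr v).mpr hvarr, ?_⟩, by simpa using hv0⟩
    rw [hcnt]; simp only [Prod.mk.injEq, true_and]; push_cast; omega
  · rintro ⟨hmem, h0⟩
    obtain ⟨v, hv, rfl⟩ := hmem
    have hvarr : v ∈ arr := (PySem.Set.mem_ofList arr v).mp hv
    have h1 : 1 ≤ arr.count v := List.count_pos_iff.mpr hvarr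
    have h2 : arr.count v ≤ arr.length := List.count_le_length
    refine ⟨arr.count v - 1, by omega, v, ⟨?_, by simpa using h0, by omega⟩, ?_⟩
    · exact (PySem.List.sorted_perm _ _ false).mem_iff.mpr ((PySem.Set.mem_ofList arr v).mpr hvarr)
    · simp only [Prod.mk.injEq, true_and]
      omega

-- the two pair lists coincide

-- the two pair lists coincide
theorem pv_pairs_eq (arr : List Int) :
    ((PySem.List.sorted2 ((PySem.Dict.counter arr).items) (fun x => x.2) (fun x => x.1))).filter
        (fun p => decide (p.1 ≠ 0)) = pvPairsB arr := by
  rw [pv_sorted2_eq_sorted_lex]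
  set key : Int × Int → Lex (Int × Int) := fun p => toLex (p.2, p.1) with hkey
  set F := ((PySem.Dict.counter arr).items.filter (fun q => decide (q.1 ≠ 0))) with hF
  -- items are nodup
  have hitems : ((PySem.Dict.counter arr).items).Nodup := by
    rw [PySem.Dict.items_counter]
    exact (PySem.Set.nodup_ofList arr).map (fun a b h => congrArg Prod.fst h)
  -- LHS is sorted F key
  have hL : PySem.List.sorted F key =
      (PySem.List.sorted ((PySem.Dict.counter arr).items) key).filter (fun p => decide (p.1 ≠ 0)) := by
    apply PySem.List.sorted_eq_of_perm_of_pairwise_lt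
    · exact ((PySem.List.sorted_perm _ key false).filter _)
    · have hle := PySem.List.sorted_pairwise ((PySem.Dict.counter arr).items) key
      have hnd : (PySem.List.sorted ((PySem.Dict.counter arr).items) key).Nodup :=
        (PySem.List.sorted_perm _ key false).nodup_iff.mpr hitems
      refine ((hle.and hnd).imp ?_).filter _
      rintro a b ⟨h1, h2⟩
      exact lt_of_le_of_ne h1 (fun hc => h2 (pv_key_inj a b hc))
  -- RHS is sorted F key
  have hR : PySem.List.sorted F key = pvPairsB arr := by
    apply PySem.List.sorted_eq_of_perm_of_pairwise_lt
    · apply (List.perm_ext_iff_of_nodup ?_ ?_).mpr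
      · exact fun p => pv_mem_pairsB arr p
      · exact (pv_pairsB_pairwise arr).imp (fun h => fun hc => absurd (hc ▸ h) (lt_irrefl _))
      · exact hitems.filter _
    · exact pv_pairsB_pairwise arr
  rw [← hL, hR]

-- the per-row equality
theorem pv_row_eq (arr : List Int) : pvRowA arr = pvRowB arr := by
  rw [pv_rowA_flat, pv_rowB_flat, pv_pairs_eq]

-- ===== VERDICT (by name: the statement is the Claim_ definition above) =====
theorem do_oper_spec : Claim_equal_do_oper := by
  intro A oper _ _
  unfold Spec_do_oper do_oper do_oper_alt
  simp only [PySem.List.foldl_append_singleton_eq_map, List.nil_append, pv_row_eq]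
  cases hm : PySem.List.max? (((if oper = "C" then pvZipStar A else A).map pvRowB).map
      (fun x => x.length)) (fun y => y) with
  | none => rfl
  | some m =>
    dsimp only
    have hpad : (((if oper = "C" then pvZipStar A else A).map pvRowB).map
          (fun x => x ++ (List.range (m - x.length)).map (fun _ => (0 : Int)))).take 100
        = (((if oper = "C" then pvZipStar A else A).map pvRowB).take 100).map
          (fun r => r ++ List.replicate (m - r.length) 0) := by
      rw [← List.map_take]
      exact List.map_congr_left (fun x _ => by
        simp only [List.map_const', List.length_range])
    rw [hpad]
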